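-- pv_equiv track=rewrite | github.com/thendarion/python-sandbox | palindrome/palindrome/get_palindrome.py | is_palindromeable
-- ===== SOURCE A (Python) =====
-- def is_palindromeable(candidate: str) -> bool:
--     """
--     Check if a string with a wild card (?) can be rearranged to form a palindrome.
--     """
--     char_map = { '?' : { "count" : 0, "odd" : 0 } }
--     characters = sorted(candidate)
--     for char in characters:
--         count = candidate.count(char)
--         char_map[char] = {
--             "count" : count,
--             "odd" : (count % 2)
--         }
--     odd_count = sum(value["odd"] for key, value in char_map.items() if key != '?')
--     if odd_count > (char_map['?']['count'] + 1) :
--         return False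
--     return True
-- ===== SOURCE B (Python) =====
-- def is_palindromeable(candidate: str) -> bool:
--     """
--     Check if a string with a wild card (?) can be rearranged to form a palindrome.
--     Single pass: toggle each non-'?' character's parity in a set, count wildcards.
--     """
--     odd = set()
--     wildcards = 0
--     for ch in candidate:
--         if ch == '?':
--             wildcards += 1
--         elif ch in odd:
--             odd.discard(ch)
--         else:
--             odd.add(ch)
--     return len(odd) <= wildcards + 1
-- ===== Notes on version B (the rewrite author's own statement) =====
-- stated objective: faster
-- what changed: Replaces A's sort plus per-character full-string recount plus dict-and-sum of parities with a single pass that toggles each character's parity in a set and counts wildcards.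
import Mathlib
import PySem

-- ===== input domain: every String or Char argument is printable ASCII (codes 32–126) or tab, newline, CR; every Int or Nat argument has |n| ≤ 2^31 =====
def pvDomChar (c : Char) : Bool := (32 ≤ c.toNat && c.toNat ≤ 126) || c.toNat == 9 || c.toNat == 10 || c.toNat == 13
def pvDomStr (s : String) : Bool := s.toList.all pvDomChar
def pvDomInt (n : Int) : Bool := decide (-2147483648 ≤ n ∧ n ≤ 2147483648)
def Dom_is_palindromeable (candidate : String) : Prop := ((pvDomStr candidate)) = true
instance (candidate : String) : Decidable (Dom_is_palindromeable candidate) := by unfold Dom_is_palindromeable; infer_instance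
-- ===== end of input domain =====

-- B replaces A's sort + per-character full recount + dict/sum of parities by one
-- pass toggling each character's parity in a set while counting the wildcards.

-- ===== PORT A =====
-- the inner Python dict {"count": c, "odd": o} is ported as the pair (c, o)
def is_palindromeable (candidate : String) : Bool :=
  let char_map0 : PySem.Dict Char (Int × Int) := PySem.Dict.ofList [('?', ((0 : Int), (0 : Int)))]
  let characters := PySem.List.sorted candidate.toList (fun c => c) false
  let char_map := characters.foldl (fun d char =>
      let count : Int := (PySem.Chars.count candidate.toList [char] : Int)
      d.insert char (count, PySem.Int.mod count 2)) char_map0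
  let odd_count : Int :=
    ((char_map.items.filter (fun kv => kv.1 != '?')).map (fun kv => kv.2.2)).sum
  -- char_map['?'] is always present (seeded above), so the getD default is never used
  if odd_count > (char_map.getD '?' ((0 : Int), (0 : Int))).1 + 1 then false else true

-- ===== PORT B =====
def is_palindromeable_alt (candidate : String) : Bool :=
  let st := candidate.toList.foldl
    (fun (st : PySem.Set Char × Int) ch =>
      if ch = '?' then (st.1, st.2 + 1)
      else if PySem.Set.contains st.1 ch then (PySem.Set.discard st.1 ch, st.2)
      else (PySem.Set.add st.1 ch, st.2))
    (PySem.Set.empty, (0 : Int))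
  decide (PySem.Set.len st.1 ≤ st.2 + 1)

-- ===== PRECONDITION & SPEC =====
def Spec_is_palindromeable (candidate : String) (out : Bool) : Prop := out = is_palindromeable_alt candidate
instance (candidate : String) (out : Bool) : Decidable (Spec_is_palindromeable candidate out) := by unfold Spec_is_palindromeable; infer_instance

-- ===== CLAIM (what is proved, stated in full; the proofs are below) =====
def Claim_equal_is_palindromeable : Prop := ∀ (candidate : String), Dom_is_palindromeable candidate → Spec_is_palindromeable candidate (is_palindromeable candidate)

-- ===== LEMMAS AND PROOFS =====

-- str.count with a single-character needle is the List.count of that character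
theorem pvCountGo_single (c : Char) :
    ∀ (fuel : Nat) (l : List Char) (acc : Nat), l.length ≤ fuel →
      PySem.Chars.count.go [c] fuel l acc = acc + l.count c := by
  intro fuel
  induction fuel with
  | zero =>
      intro l acc h
      have : l = [] := List.eq_nil_of_length_eq_zero (Nat.le_zero.mp h)
      subst this; simp [PySem.Chars.count.go]
  | succ n ih =>
      intro l acc h
      cases l with
      | nil => simp [PySem.Chars.count.go]
      | cons x t =>
          simp only [PySem.Chars.count.go]
          by_cases hx : x = c
          · subst hx
            simp only [List.isPrefixOf, BEq.rfl, Bool.true_and, if_pos]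
            have hdrop : List.drop [x].length (x :: t) = t := rfl
            rw [hdrop, ih t (acc + 1) (by simpa using Nat.lt_succ_iff.mp (by simpa using h))]
            simp [List.count_cons]
            omega
          · have : ([c].isPrefixOf (x :: t)) = false := by
              simp [List.isPrefixOf, hx]
              exact fun hcx => absurd hcx.symm hx
            rw [this]
            simp only [if_neg (by simp : ¬ (false = true))]
            rw [ih t acc (by simpa using Nat.lt_succ_iff.mp (by simpa using h))]
            simp [List.count_cons, Ne.symm hx, hx]

theorem pvCount_single (cs : List Char) (c : Char) :
    PySem.Chars.count cs [c] = cs.count c := by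
  simp [PySem.Chars.count]
  simpa using pvCountGo_single c cs.length cs 0 le_rfl

-- getD on a fold that inserts each key with a value depending on the key only
theorem pvGetD_fold (g : Char → Int × Int) :
    ∀ (l : List Char) (d : PySem.Dict Char (Int × Int)) (k : Char) (dflt : Int × Int),
      (l.foldl (fun d ch => d.insert ch (g ch)) d).getD k dflt
        = if k ∈ l then g k else d.getD k dflt := by
  intro l
  induction l with
  | nil => intro d k dflt; simp
  | cons x t ih =>
      intro d k dflt
      simp only [List.foldl_cons, ih, List.mem_cons]
      by_cases hk : k ∈ t
      · simp [hk]
      · by_cases hx : k = x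
        · subst hx; simp [hk, PySem.Dict.getD_insert_self]
        · simp [hk, hx, PySem.Dict.getD_insert_of_ne _ _ _ hx]

-- B's loop invariant: the set holds exactly the non-'?' characters seen an odd
-- number of times so far, and the integer counts the wildcards seen so far
theorem pvAltInv :
    ∀ (l : List Char) (s : PySem.Set Char) (q : Int),
      s.Nodup → '?' ∉ s →
      let r := l.foldl (fun (st : PySem.Set Char × Int) ch =>
        if ch = '?' then (st.1, st.2 + 1)
        else if PySem.Set.contains st.1 ch then (PySem.Set.discard st.1 ch, st.2)
        else (PySem.Set.add st.1 ch, st.2)) (s, q)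
      r.1.Nodup ∧ '?' ∉ r.1 ∧ r.2 = q + l.count '?' ∧
        (∀ c, c ∈ r.1 ↔ c ≠ '?' ∧ ((if c ∈ s then 1 else 0) + l.count c) % 2 = 1) := by
  intro l
  induction l with
  | nil =>
      intro s q hnd h?
      simp only [List.foldl_nil]
      refine ⟨hnd, h?, by simp, ?_⟩
      intro c
      by_cases hc : c ∈ s
      · simp [hc]
        exact fun h => h? (h ▸ hc)
      · simp [hc]
  | cons x t ih =>
      intro s q hnd h?
      simp only [List.foldl_cons]
      by_cases hx : x = '?'
      · subst hx
        rw [if_pos rfl]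
        obtain ⟨h1, h2, h3, h4⟩ := ih s (q + 1) hnd h?
        refine ⟨h1, h2, by rw [h3]; simp [List.count_cons]; omega, ?_⟩
        intro c
        rw [h4 c]
        refine and_congr_right fun hcq => ?_
        simp [List.count_cons, Ne.symm hcq]
      · rw [if_neg hx]
        by_cases hmem : x ∈ s
        · rw [if_pos (by simpa [PySem.Set.contains_iff] using hmem)]
          obtain ⟨h1, h2, h3, h4⟩ :=
            ih (PySem.Set.discard s x) q (PySem.Set.nodup_discard s x hnd)
              (fun h => h? ((PySem.Set.mem_discard s x '?').mp h).1)
          refine ⟨h1, h2, by rw [h3]; simp [List.count_cons, hx], ?_⟩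
          intro c
          rw [h4 c]
          refine and_congr_right fun hcq => ?_
          by_cases hc : c = x
          · subst hc
            simp [PySem.Set.mem_discard, List.count_cons, hmem]
            omega
          · simp [PySem.Set.mem_discard, List.count_cons, hc, Ne.symm hc]
        · rw [if_neg (by simpa [PySem.Set.contains_iff] using hmem)]
          obtain ⟨h1, h2, h3, h4⟩ :=
            ih (PySem.Set.add s x) q (PySem.Set.nodup_add s x hnd)
              (fun h => by
                rcases (PySem.Set.mem_add s x '?').mp h with h | h
                · exact h? h
                · exact hx h.symm)
          refine ⟨h1, h2, by rw [h3]; simp [List.count_cons, hx], ?_⟩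
          intro c
          rw [h4 c]
          refine and_congr_right fun hcq => ?_
          by_cases hc : c = x
          · subst hc
            simp [PySem.Set.mem_add, List.count_cons, hmem]
            omega
          · simp [PySem.Set.mem_add, List.count_cons, hc, Ne.symm hc]

-- the key→value function A's loop inserts with (value depends on the key only)
def pvG (cs : List Char) : Char → Int × Int :=
  fun ch => ((PySem.Chars.count cs [ch] : Int), PySem.Int.mod ((PySem.Chars.count cs [ch] : Int)) 2)

-- A's body, with the insert-loop written through pvG (definitional)
theorem pvA_unfold (candidate : String) :
    is_palindromeable candidate =
      (let D := (PySem.List.sorted candidate.toList (fun c => c) false).foldl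
          (fun d ch => d.insert ch (pvG candidate.toList ch))
          (PySem.Dict.ofList [('?', ((0 : Int), (0 : Int)))]);
       if ((D.items.filter (fun kv => kv.1 != '?')).map (fun kv => kv.2.2)).sum
            > (D.getD '?' ((0 : Int), (0 : Int))).1 + 1 then false else true) := rfl

-- ===== VERDICT (by name: the statement is the Claim_ definition above) =====
theorem is_palindromeable_spec : Claim_equal_is_palindromeable := by
  intro candidate _
  unfold Spec_is_palindromeable is_palindromeable_alt
  rw [pvA_unfold]
  obtain ⟨hFnd, -, hq, hmem⟩ :=
    pvAltInv candidate.toList PySem.Set.empty 0 List.nodup_nil (by simp [PySem.Set.empty])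
  set cs := candidate.toList with hcs
  set ss := PySem.List.sorted cs (fun c => c) false with hss
  set d0 : PySem.Dict Char (Int × Int) := PySem.Dict.ofList [('?', ((0 : Int), (0 : Int)))] with hd0
  set D := ss.foldl (fun d ch => d.insert ch (pvG cs ch)) d0 with hD
  have hk0 : d0.keys = ['?'] := rfl
  have hkeys : D.keys = PySem.Set.update d0.keys ss :=
    PySem.Dict.keys_foldl_insert ss (fun _ ch => pvG cs ch) d0
  have hknd : D.keys.Nodup :=
    PySem.Dict.nodup_keys_foldl_insert ss (fun _ ch => pvG cs ch) d0 (by rw [hk0]; simp)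
  have hgetD : ∀ k dflt, D.getD k dflt = if k ∈ ss then pvG cs k else d0.getD k dflt :=
    fun k dflt => pvGetD_fold (pvG cs) ss d0 k dflt
  have hitems : D.items = D.keys.map (fun k => (k, D.getD k ((0 : Int), (0 : Int)))) :=
    PySem.Dict.items_eq_map_keys D hknd _
  have hodd : ((D.items.filter (fun kv => kv.1 != '?')).map (fun kv => kv.2.2)).sum
      = (((D.keys.filter (fun k : Char => k != '?')).filter
            (fun k => decide (cs.count k % 2 = 1))).length : Int) := by
    rw [hitems, List.filter_map, List.map_map]
    have h1 : List.filter ((fun kv : Char × (Int × Int) => kv.1 != '?')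
          ∘ (fun k => (k, D.getD k ((0 : Int), (0 : Int))))) D.keys
        = D.keys.filter (fun k : Char => k != '?') := by
      simp [Function.comp_def]
    rw [h1]
    have h2 : ∀ k ∈ D.keys.filter (fun k : Char => k != '?'),
        ((fun kv : Char × (Int × Int) => kv.2.2)
          ∘ (fun k => (k, D.getD k ((0 : Int), (0 : Int))))) k
        = (fun k : Char => if cs.count k % 2 = 1 then (1 : Int) else 0) k := by
      intro k hk
      have hk1 : k ∈ D.keys := (List.mem_filter.mp hk).1
      have hkne : k ≠ '?' := by simpa using (List.mem_filter.mp hk).2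
      have hkss : k ∈ ss := by
        rw [hkeys, hk0] at hk1
        rcases (PySem.Set.mem_update _ _ _).mp hk1 with h | h
        · simp at h; exact absurd h hkne
        · exact h
      simp only [Function.comp_def]
      rw [hgetD, if_pos hkss]
      show PySem.Int.mod _ 2 = _
      rw [pvCount_single]
      have hm2 : PySem.Int.mod ((cs.count k : Nat) : Int) 2 = ((cs.count k % 2 : Nat) : Int) :=
        by exact_mod_cast PySem.Int.mod_natCast (cs.count k) 2
      rw [hm2]
      rcases Nat.mod_two_eq_zero_or_one (cs.count k) with h | h <;> simp [h]
    rw [List.map_congr_left h2, PySem.List.sum_map_ite_one_zero',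
      List.countP_eq_length_filter]
  have hbud : (D.getD '?' ((0 : Int), (0 : Int))).1 = (cs.count '?' : Int) := by
    rw [hgetD]
    by_cases h : '?' ∈ ss
    · rw [if_pos h]
      show ((PySem.Chars.count cs ['?'] : Int)) = _
      rw [pvCount_single]
    · rw [if_neg h]
      have hc0 : cs.count '?' = 0 := by
        rw [List.count_eq_zero]
        intro hmm
        exact h ((PySem.List.mem_sorted _ _ _ _).mpr hmm)
      rw [hc0]
      rfl
  have hmem' : ∀ c, c ∈ (cs.foldl (fun (st : PySem.Set Char × Int) ch =>
        if ch = '?' then (st.1, st.2 + 1)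
        else if PySem.Set.contains st.1 ch then (PySem.Set.discard st.1 ch, st.2)
        else (PySem.Set.add st.1 ch, st.2)) (PySem.Set.empty, 0)).1
      ↔ c ≠ '?' ∧ cs.count c % 2 = 1 := by
    intro c; rw [hmem c]; simp [PySem.Set.empty]
  have hperm : ((D.keys.filter (fun k : Char => k != '?')).filter
        (fun k => decide (cs.count k % 2 = 1))).Perm
      (cs.foldl (fun (st : PySem.Set Char × Int) ch =>
        if ch = '?' then (st.1, st.2 + 1)
        else if PySem.Set.contains st.1 ch then (PySem.Set.discard st.1 ch, st.2)
        else (PySem.Set.add st.1 ch, st.2)) (PySem.Set.empty, 0)).1 := by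
    rw [List.perm_ext_iff_of_nodup ((hknd.filter _).filter _) hFnd]
    intro c
    rw [hmem' c]
    simp only [List.mem_filter, decide_eq_true_eq]
    constructor
    · rintro ⟨⟨hk, hne⟩, hoddc⟩
      exact ⟨by simpa using hne, hoddc⟩
    · rintro ⟨hne, hoddc⟩
      have hc : c ∈ cs := List.count_pos_iff.mp (by omega)
      refine ⟨⟨?_, by simpa using hne⟩, hoddc⟩
      rw [hkeys, hk0]
      exact (PySem.Set.mem_update _ _ _).mpr (Or.inr ((PySem.List.mem_sorted _ _ _ _).mpr hc))
    
  simp only []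
  rw [hodd, hbud, hperm.length_eq, hq]
  simp only [PySem.Set.len]
  split_ifs with h
  · symm
    simp only [decide_eq_false_iff_not]
    omega
  · symm
    simp only [decide_eq_true_eq]
    omega
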